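-- pv_equiv track=rewrite | github.com/Apress/Mastering-Algorithms-with-Python | Listing_6_3_statistical_test_random_numbers.py | count_num_plus_minus
-- ===== SOURCE A (Python) =====
-- def count_num_plus_minus(plus_and_minus):
--     if not plus_and_minus:
--         return
--
--     count = 1
--     last_seen = plus_and_minus[0]
--     for i in range(1, len(plus_and_minus)):
--         cur_sign = plus_and_minus[i]
--         if cur_sign == last_seen:
--             continue
--         else:
--             count += 1
--             last_seen = cur_sign
--     return count
-- ===== SOURCE B (Python) =====
-- def count_num_plus_minus(plus_and_minus):
--     if not plus_and_minus:
--         return None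
--
--     def runs(seg):
--         # number of maximal equal-value runs in the nonempty segment seg
--         if len(seg) == 1:
--             return 1
--         mid = len(seg) // 2
--         left, right = seg[:mid], seg[mid:]
--         # a run straddling the split is counted once on each side: merge it
--         return runs(left) + runs(right) - (left[-1] == right[0])
--
--     return runs(plus_and_minus)
-- ===== Notes on version B (the rewrite author's own statement) =====
-- stated objective: alternative
-- what changed: Replaces the linear count/last_seen state machine with a divide-and-conquer recursion: split the list in half, count runs in each half, and subtract one when the boundary elements are equal (a run straddles the split).
import Mathlib
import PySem

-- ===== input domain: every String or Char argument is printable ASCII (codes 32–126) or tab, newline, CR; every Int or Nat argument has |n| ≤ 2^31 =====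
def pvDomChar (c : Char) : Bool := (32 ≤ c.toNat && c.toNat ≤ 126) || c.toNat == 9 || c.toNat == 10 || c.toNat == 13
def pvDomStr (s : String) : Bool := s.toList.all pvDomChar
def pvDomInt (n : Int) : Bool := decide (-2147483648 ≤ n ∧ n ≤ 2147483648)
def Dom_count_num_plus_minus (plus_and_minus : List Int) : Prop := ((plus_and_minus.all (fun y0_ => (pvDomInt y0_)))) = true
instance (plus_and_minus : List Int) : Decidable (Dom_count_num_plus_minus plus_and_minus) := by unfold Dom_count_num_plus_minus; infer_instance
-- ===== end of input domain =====

-- B replaces A's linear count/last_seen state machine with a divide-and-conquer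
-- recursion (count runs in each half, merge at the split); objective: alternative.

-- ===== PORT A =====
-- A: empty list -> None; else fold the loop state (count, last_seen) over the tail.
def count_num_plus_minus (plus_and_minus : List Int) : Option Int :=
  match plus_and_minus with
  | [] => none
  | x :: rest =>
      let s := rest.foldl
        (fun (st : Int × Int) cur => if cur = st.2 then st else (st.1 + 1, cur))
        (1, x)
      some s.1

-- ===== PORT B =====
-- B's inner helper `runs`: on a nonempty segment, split at len//2, recurse on both
-- halves, subtract 1 when the boundary elements are equal (Python's bool-as-int).
def pvRuns : List Int → Int
  | [] => 0          -- never reached: `runs` is only called on nonempty segments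
  | [_] => 1
  | a :: b :: l =>
      let seg := a :: b :: l
      let m := seg.length / 2
      pvRuns (seg.take m) + pvRuns (seg.drop m) -
        (if (seg.take m).getLast? = (seg.drop m).head? then 1 else 0)
termination_by seg => seg.length
decreasing_by
  all_goals simp [List.length_take, List.length_drop]; omega

def count_num_plus_minus_alt (plus_and_minus : List Int) : Option Int :=
  match plus_and_minus with
  | [] => none
  | _ :: _ => some (pvRuns plus_and_minus)

-- ===== PRECONDITION & SPEC =====
def Spec_count_num_plus_minus (plus_and_minus : List Int) (out : Option Int) : Prop := out = count_num_plus_minus_alt plus_and_minus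
instance (plus_and_minus : List Int) (out : Option Int) : Decidable (Spec_count_num_plus_minus plus_and_minus out) := by unfold Spec_count_num_plus_minus; infer_instance

-- ===== CLAIM =====
def Claim_equal_count_num_plus_minus : Prop := ∀ (plus_and_minus : List Int), Dom_count_num_plus_minus plus_and_minus → Spec_count_num_plus_minus plus_and_minus (count_num_plus_minus plus_and_minus)

-- ===== LEMMAS AND PROOFS =====

-- number of adjacent boundaries where the value changes
def pvChg (xs : List Int) : Int :=
  (((xs.zip xs.tail).filter (fun p => decide (p.1 ≠ p.2))).length : Int)

theorem pvChg_single (x : Int) : pvChg [x] = 0 := rfl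

theorem pvChg_cons₂ (x y : Int) (l : List Int) :
    pvChg (x :: y :: l) = (if x = y then 0 else 1) + pvChg (y :: l) := by
  by_cases h : x = y
  · simp [pvChg, h]
  · simp [pvChg, h]
    omega

theorem pvChg_append : ∀ (L R : List Int), L ≠ [] → R ≠ [] →
    pvChg (L ++ R) = pvChg L + pvChg R +
      (if L.getLast? = R.head? then 0 else 1) := by
  intro L
  induction L with
  | nil => intro R h; exact absurd rfl h
  | cons x l ih =>
      intro R _ hR
      cases l with
      | nil =>
          cases R with
          | nil => exact absurd rfl hR
          | cons r rs =>
              simp [pvChg_cons₂, pvChg_single]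
              by_cases h : x = r
              · simp [h]
              · simp [h]
                omega
      | cons y l' =>
          have := ih R (by simp) hR
          simp only [List.cons_append] at *
          rw [pvChg_cons₂, this, pvChg_cons₂]
          have hlast : (x :: y :: l').getLast? = (y :: l').getLast? := by
            simp [List.getLast?_cons_cons]
          rw [hlast]; ring

-- A's fold computes c + pvChg (x :: rest)
theorem cnpm_fold_eq (rest : List Int) : ∀ (c x : Int),
    (rest.foldl (fun (st : Int × Int) cur => if cur = st.2 then st else (st.1 + 1, cur)) (c, x)).1
      = c + pvChg (x :: rest) := by
  induction rest with
  | nil => intro c x; simp [pvChg]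
  | cons y ys ih =>
      intro c x
      by_cases h : y = x
      · simp [List.foldl, h, ih, pvChg_cons₂]
      · have hx : x ≠ y := fun e => h e.symm
        simp [List.foldl, h, ih, pvChg_cons₂, hx]
        ring

-- B's divide-and-conquer computes 1 + pvChg on nonempty input
theorem pvRuns_cons₂ (a b : Int) (l : List Int) :
    pvRuns (a :: b :: l) =
      pvRuns ((a :: b :: l).take ((a :: b :: l).length / 2)) +
        pvRuns ((a :: b :: l).drop ((a :: b :: l).length / 2)) -
        (if ((a :: b :: l).take ((a :: b :: l).length / 2)).getLast? =
            ((a :: b :: l).drop ((a :: b :: l).length / 2)).head? then 1 else 0) := by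
  rw [pvRuns]

theorem pvRuns_eq : ∀ (seg : List Int), seg ≠ [] → pvRuns seg = 1 + pvChg seg := by
  intro seg
  induction seg using pvRuns.induct with
  | case1 => intro h; exact absurd rfl h
  | case2 x => intro _; simp [pvRuns, pvChg_single]
  | case3 a b l seg' m' ihL ihR =>
      intro _
      have ihL' : (a :: b :: l).take ((a :: b :: l).length / 2) ≠ [] →
          pvRuns ((a :: b :: l).take ((a :: b :: l).length / 2)) =
            1 + pvChg ((a :: b :: l).take ((a :: b :: l).length / 2)) := ihL
      have ihR' : (a :: b :: l).drop ((a :: b :: l).length / 2) ≠ [] →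
          pvRuns ((a :: b :: l).drop ((a :: b :: l).length / 2)) =
            1 + pvChg ((a :: b :: l).drop ((a :: b :: l).length / 2)) := ihR
      have hm1 : 1 ≤ (a :: b :: l).length / 2 := by simp; omega
      have hm2 : (a :: b :: l).length / 2 < (a :: b :: l).length := by simp; omega
      have htake : (a :: b :: l).take ((a :: b :: l).length / 2) ≠ [] := by
        intro h
        have := congrArg List.length h
        simp [List.length_take] at this
      have hdrop : (a :: b :: l).drop ((a :: b :: l).length / 2) ≠ [] := by
        intro h
        have := congrArg List.length h
        simp [List.length_drop] at this
        omega
      have hchg := pvChg_append ((a :: b :: l).take ((a :: b :: l).length / 2))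
        ((a :: b :: l).drop ((a :: b :: l).length / 2)) htake hdrop
      rw [List.take_append_drop] at hchg
      rw [pvRuns_cons₂, ihL' htake, ihR' hdrop, hchg]
      split_ifs with h
      all_goals omega

-- ===== VERDICT =====
theorem count_num_plus_minus_spec : Claim_equal_count_num_plus_minus := by
  intro xs _
  unfold Spec_count_num_plus_minus count_num_plus_minus count_num_plus_minus_alt
  match xs with
  | [] => rfl
  | x :: rest =>
      simp only []
      rw [cnpm_fold_eq rest 1 x, pvRuns_eq (x :: rest) (by simp)]
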